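-- pv_equiv track=rewrite | github.com/salv-orlando/vmware-nsxlib | vmware_nsxlib/v3/utils.py | update_v3_tags
-- ===== SOURCE A (Python) =====
-- MAX_TAG_LEN = 256
--
-- def update_v3_tags(current_tags, tags_update):
--     current_scopes = set([tag['scope'] for tag in current_tags])
--     updated_scopes = set([tag['scope'] for tag in tags_update])
--
--     # All tags scopes which are either completely new or already defined on the
--     # resource are left in place, unless the tag value is empty, in that case
--     # it is ignored.
--     tags = [{'scope': tag['scope'], 'tag': tag['tag']}
--             for tag in (current_tags + tags_update)
--             if tag['tag'] and
--             tag['scope'] in (current_scopes ^ updated_scopes)]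
--
--     modified_scopes = current_scopes & updated_scopes
--     for tag in tags_update:
--         if tag['scope'] in modified_scopes:
--             # If the tag value is empty or None, then remove the tag completely
--             if tag['tag']:
--                 tag['tag'] = tag['tag'][:MAX_TAG_LEN]
--                 tags.append(tag)
--
--     return tags
-- ===== SOURCE B (Python) =====
-- MAX_TAG_LEN = 256
--
-- def update_v3_tags(current_tags, tags_update):
--     # Decorate-sort-undecorate: one classifying pass over the concatenation
--     # assigns each surviving tag a numeric rank (kept/new tags keep their
--     # position; modified tags are pushed past everything by adding `total`),
--     # then a single sort by rank produces the output order.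
--     # Mutates matching tags_update entries in place, like the original.
--     n = len(current_tags)
--     total = n + len(tags_update)
--     current_scopes = {t['scope'] for t in current_tags}
--     updated_scopes = {t['scope'] for t in tags_update}
--     decorated = []
--     for i, tag in enumerate(current_tags + tags_update):
--         if not tag['tag']:
--             continue
--         if i < n:
--             if tag['scope'] not in updated_scopes:
--                 decorated.append((i, {'scope': tag['scope'], 'tag': tag['tag']}))
--         elif tag['scope'] not in current_scopes:
--             decorated.append((i, {'scope': tag['scope'], 'tag': tag['tag']}))
--         else:
--             tag['tag'] = tag['tag'][:MAX_TAG_LEN]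
--             decorated.append((i + total, tag))
--     decorated.sort(key=lambda e: e[0])
--     return [tag for _, tag in decorated]
-- ===== Notes on version B (the rewrite author's own statement) =====
-- stated objective: alternative
-- what changed: Replaces A's set-algebra filtering (XOR comprehension over the concatenation plus a separate intersection loop) with a decorate-sort-undecorate scheme: one classifying pass assigns each surviving tag an integer rank (kept/new tags keep their position index, modified tags are ranked past everything), and a single sort by rank yields the output order.
import Mathlib
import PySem

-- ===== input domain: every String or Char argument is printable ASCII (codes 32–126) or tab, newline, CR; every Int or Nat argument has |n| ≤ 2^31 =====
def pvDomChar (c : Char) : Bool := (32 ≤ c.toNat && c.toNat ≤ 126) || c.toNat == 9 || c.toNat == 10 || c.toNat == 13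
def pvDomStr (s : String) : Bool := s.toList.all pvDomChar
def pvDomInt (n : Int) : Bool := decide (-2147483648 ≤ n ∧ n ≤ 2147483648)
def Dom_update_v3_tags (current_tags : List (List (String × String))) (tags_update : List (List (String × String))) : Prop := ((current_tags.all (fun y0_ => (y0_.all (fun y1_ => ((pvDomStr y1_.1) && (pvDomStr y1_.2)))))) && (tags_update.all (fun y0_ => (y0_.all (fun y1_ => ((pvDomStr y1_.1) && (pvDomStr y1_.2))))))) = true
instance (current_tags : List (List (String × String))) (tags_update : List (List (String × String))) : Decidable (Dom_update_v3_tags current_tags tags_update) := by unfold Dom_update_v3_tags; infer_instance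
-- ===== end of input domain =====

-- B replaces A's set-algebra filtering (XOR comprehension + intersection loop) with a
-- decorate-sort-undecorate pass: one classifying loop gives each surviving tag an integer
-- rank, one sort by rank gives the output order. Return-value equivalence only: both A and B
-- mutate the matched tags_update dicts in place identically (tag['tag'] cut to MAX_TAG_LEN).

-- ===== PORT A =====
-- shared dict primitives (identical Python operations in A and B): tag['scope'], tag['tag'],
-- the fresh dict {'scope': …, 'tag': …}, and the in-place 'tag['tag'] = tag['tag'][:256]'
def pvScope (t : List (String × String)) : String := (List.lookup "scope" t).getD ""
def pvTag (t : List (String × String)) : String := (List.lookup "tag" t).getD ""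
def pvMk (t : List (String × String)) : List (String × String) :=
  [("scope", pvScope t), ("tag", pvTag t)]
def pvTrunc (t : List (String × String)) : List (String × String) :=
  ((PySem.Dict.mk t).insert "tag" (PySem.Str.slice (pvTag t) none (some 256))).items

def update_v3_tags (current_tags : List (List (String × String))) (tags_update : List (List (String × String))) : List (List (String × String)) :=
  let current_scopes : PySem.Set String := PySem.Set.ofList (current_tags.map pvScope)
  let updated_scopes : PySem.Set String := PySem.Set.ofList (tags_update.map pvScope)
  let tags :=
    ((current_tags ++ tags_update).filter
      (fun t => pvTag t != "" &&
        (PySem.Set.symmDiff current_scopes updated_scopes).contains (pvScope t))).map pvMk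
  let modified_scopes := PySem.Set.inter current_scopes updated_scopes
  tags_update.foldl
    (fun acc t =>
      if modified_scopes.contains (pvScope t) then
        if pvTag t != "" then acc ++ [pvTrunc t]
        else acc
      else acc)
    tags

-- ===== PORT B =====
def update_v3_tags_alt (current_tags : List (List (String × String))) (tags_update : List (List (String × String))) : List (List (String × String)) :=
  let n : Int := current_tags.length
  let total : Int := n + tags_update.length
  let current_scopes : PySem.Set String := PySem.Set.ofList (current_tags.map pvScope)
  let updated_scopes : PySem.Set String := PySem.Set.ofList (tags_update.map pvScope)
  let decorated : List (Int × List (String × String)) :=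
    (PySem.List.enumerate (current_tags ++ tags_update)).foldl
      (fun acc e =>
        if pvTag e.2 == "" then acc
        else if e.1 < n then
          (if !(updated_scopes.contains (pvScope e.2)) then acc ++ [(e.1, pvMk e.2)] else acc)
        else if !(current_scopes.contains (pvScope e.2)) then acc ++ [(e.1, pvMk e.2)]
        else acc ++ [(e.1 + total, pvTrunc e.2)])
      []
  (PySem.List.sorted decorated (fun e => e.1) false).map (fun e => e.2)

-- ===== PRECONDITION & SPEC =====
-- Pre_ excludes only tags missing a 'scope' or 'tag' key, on which the Python A raises KeyError.
def Pre_update_v3_tags (current_tags : List (List (String × String))) (tags_update : List (List (String × String))) : Prop :=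
  ∀ t ∈ current_tags ++ tags_update,
    (List.lookup "scope" t).isSome = true ∧ (List.lookup "tag" t).isSome = true
instance (current_tags : List (List (String × String))) (tags_update : List (List (String × String))) : Decidable (Pre_update_v3_tags current_tags tags_update) := by unfold Pre_update_v3_tags; infer_instance

def pvWitness_update_v3_tags : (List (List (String × String))) × (List (List (String × String))) :=
  ([[("scope", "a"), ("tag", "x")]], [[("scope", "a"), ("tag", "y")], [("scope", "b"), ("tag", "z")]])

def Spec_update_v3_tags (current_tags : List (List (String × String))) (tags_update : List (List (String × String))) (out : List (List (String × String))) : Prop := out = update_v3_tags_alt current_tags tags_update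
instance (current_tags : List (List (String × String))) (tags_update : List (List (String × String))) (out : List (List (String × String))) : Decidable (Spec_update_v3_tags current_tags tags_update out) := by unfold Spec_update_v3_tags; infer_instance

-- ===== CLAIM (what is proved, stated in full; the proofs are below) =====
def Claim_equal_update_v3_tags : Prop := ∀ (current_tags : List (List (String × String))) (tags_update : List (List (String × String))), Dom_update_v3_tags current_tags tags_update → Pre_update_v3_tags current_tags tags_update → Spec_update_v3_tags current_tags tags_update (update_v3_tags current_tags tags_update)

-- ===== LEMMAS AND PROOFS =====

-- A tag drawn from `xs` has its scope in set(map pvScope xs).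
theorem pv_scope_mem {xs : List (List (String × String))} {t : List (String × String)}
    (ht : t ∈ xs) : pvScope t ∈ PySem.Set.ofList (xs.map pvScope) :=
  (PySem.Set.mem_ofList _ _).mpr (List.mem_map_of_mem ht)

-- For a scope known to lie in cs: membership in cs ^ us is exactly non-membership in us.
theorem pv_symmDiff_left {cs us : PySem.Set String} {x : String} (hx : x ∈ cs) :
    (PySem.Set.symmDiff cs us).contains x = !(us.contains x) := by
  by_cases h : x ∈ us <;> simp [PySem.Set.mem_symmDiff, hx, h]

-- For a scope known to lie in us: membership in cs ^ us is exactly non-membership in cs.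
theorem pv_symmDiff_right {cs us : PySem.Set String} {x : String} (hx : x ∈ us) :
    (PySem.Set.symmDiff cs us).contains x = !(cs.contains x) := by
  by_cases h : x ∈ cs <;> simp [PySem.Set.mem_symmDiff, hx, h]

-- For a scope known to lie in us: membership in cs & us is exactly membership in cs.
theorem pv_inter_right {cs us : PySem.Set String} {x : String} (hx : x ∈ us) :
    (PySem.Set.inter cs us).contains x = cs.contains x := by
  by_cases h : x ∈ cs <;> simp [PySem.Set.mem_inter, hx, h]

-- filtering an enumeration by a predicate on the element, then dropping the indices,
-- is filtering the underlying list
theorem pv_enum_filter_map_snd {α β : Type} (xs : List α) (s : Int)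
    (p : Int × α → Bool) (F : Int × α → β) (q : α → Bool) (f : α → β)
    (hp : ∀ e : Int × α, p e = q e.2) (hF : ∀ e : Int × α, F e = f e.2) :
    ((PySem.List.enumerate xs s).filter p).map F = (xs.filter q).map f := by
  induction xs generalizing s with
  | nil => simp [PySem.List.enumerate_nil]
  | cons x xs ih =>
    rw [PySem.List.enumerate_cons]
    by_cases h : q x = true <;>
      simp [hp, hF, h, ih]

-- every index produced by enumerate xs s lies in [s, s + xs.length)
theorem pv_enum_fst_bounds {α : Type} {xs : List α} {s : Int} {e : Int × α}
    (he : e ∈ PySem.List.enumerate xs s) : s ≤ e.1 ∧ e.1 < s + xs.length := by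
  rcases (PySem.List.mem_enumerate_iff xs s e).mp he with ⟨k, hk, rfl⟩
  refine ⟨by simp, by simp; omega⟩

-- indices of a filtered list, re-keyed by a uniform shift, stay strictly increasing
theorem pv_pairwise_shift {α β : Type} {l : List (Int × α)}
    (hl : l.Pairwise (fun a b => a.1 < b.1)) (f : Int × α → Int × β) (c : Int)
    (hf : ∀ e, (f e).1 = e.1 + c) :
    (l.map f).Pairwise (fun a b => a.1 < b.1) := by
  rw [List.pairwise_map]
  refine hl.imp ?_
  intro a b h
  rw [hf a, hf b]; omega

-- A's result, normalised to three filter/map passes over the plain lists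
theorem pv_A_norm (cur upd : List (List (String × String))) :
    update_v3_tags cur upd =
      ((cur.filter (fun t => pvTag t != "" &&
          !((PySem.Set.ofList (upd.map pvScope)).contains (pvScope t)))).map pvMk
        ++ (upd.filter (fun t => !((PySem.Set.ofList (cur.map pvScope)).contains (pvScope t)) &&
          (pvTag t != ""))).map pvMk)
      ++ (upd.filter (fun t => (PySem.Set.ofList (cur.map pvScope)).contains (pvScope t) &&
          (pvTag t != ""))).map pvTrunc := by
  unfold update_v3_tags
  simp only []
  set cs := PySem.Set.ofList (cur.map pvScope) with hcs
  set us := PySem.Set.ofList (upd.map pvScope) with hus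
  rw [PySem.List.foldl_congr_mem upd _
        (fun acc t =>
          if (PySem.Set.inter cs us).contains (pvScope t) && (pvTag t != "") then
            acc ++ [pvTrunc t]
          else acc) _
        (by
          intro acc t _
          by_cases h2 : (pvTag t != "") = true <;> simp [h2]),
      PySem.List.foldl_append_if, List.filter_append, List.map_append, List.append_assoc]
  rw [← List.append_assoc]
  congr 1
  · congr 1
    · congr 1
      apply List.filter_congr
      intro t ht
      rw [pv_symmDiff_left (pv_scope_mem ht)]
    · congr 1
      apply List.filter_congr
      intro t ht
      rw [pv_symmDiff_right (pv_scope_mem ht), Bool.and_comm]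
  · congr 1
    apply List.filter_congr
    intro t ht
    rw [pv_inter_right (pv_scope_mem ht)]

-- B's result, normalised to the same three filter/map passes
theorem pv_B_norm (cur upd : List (List (String × String))) :
    update_v3_tags_alt cur upd =
      ((cur.filter (fun t => pvTag t != "" &&
          !((PySem.Set.ofList (upd.map pvScope)).contains (pvScope t)))).map pvMk
        ++ (upd.filter (fun t => !((PySem.Set.ofList (cur.map pvScope)).contains (pvScope t)) &&
          (pvTag t != ""))).map pvMk)
      ++ (upd.filter (fun t => (PySem.Set.ofList (cur.map pvScope)).contains (pvScope t) &&
          (pvTag t != ""))).map pvTrunc := by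
  unfold update_v3_tags_alt
  simp only []
  set cs := PySem.Set.ofList (cur.map pvScope) with hcs
  set us := PySem.Set.ofList (upd.map pvScope) with hus
  set n : Int := (cur.length : Int) with hn
  set total : Int := n + (upd.length : Int) with htotal
  rw [PySem.List.enumerate_append]
  rw [List.foldl_append]
  -- the pass over current_tags: every index is < n, so it is a single filtered append loop
  rw [PySem.List.foldl_congr_mem (PySem.List.enumerate cur 0) _
        (fun acc (e : Int × List (String × String)) =>
          if (pvTag e.2 != "" && !(us.contains (pvScope e.2))) then
            acc ++ [(e.1, pvMk e.2)]
          else acc) []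
        (by
          intro acc e he
          have hb := pv_enum_fst_bounds he
          have h1 : e.1 < n := by rw [hn]; omega
          by_cases h : (pvTag e.2 == "") = true
          · simp [bne, h]
          · simp [bne, h, h1]),
      PySem.List.foldl_append_if]
  -- the pass over tags_update: every index is ≥ n, and each surviving tag appends one entry
  rw [show ((0 : Int) + (cur.length : Int)) = n by omega]
  rw [PySem.List.foldl_congr_mem (PySem.List.enumerate upd n) _
        (fun acc (e : Int × List (String × String)) =>
          if (pvTag e.2 != "") then
            acc ++ [if !(cs.contains (pvScope e.2)) then (e.1, pvMk e.2)
                    else (e.1 + total, pvTrunc e.2)]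
          else acc) _
        (by
          intro acc e he
          have hb := pv_enum_fst_bounds he
          have h1 : ¬ (e.1 < n) := by rw [hn]; omega
          by_cases h : (pvTag e.2 == "") = true
          · simp [bne, h]
          · by_cases h2 : pvScope e.2 ∈ cs <;> simp [bne, h, h1, h2]),
      PySem.List.foldl_append_if, List.nil_append]
  -- name the two filtered enumerations and the sorted order
  have hmapg :
      (((PySem.List.enumerate upd n).filter (fun e => pvTag e.2 != "")).filter
          (fun e => !(cs.contains (pvScope e.2)))).map
          (fun (e : Int × List (String × String)) =>
            if !(cs.contains (pvScope e.2)) then (e.1, pvMk e.2)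
            else (e.1 + total, pvTrunc e.2))
        = (((PySem.List.enumerate upd n).filter (fun e => pvTag e.2 != "")).filter
            (fun e => !(cs.contains (pvScope e.2)))).map
            (fun e => (e.1, pvMk e.2)) := by
    apply List.map_congr_left
    intro e he
    have hc := (List.mem_filter.mp he).2
    rw [if_pos hc]
  have hmapg2 :
      (((PySem.List.enumerate upd n).filter (fun e => pvTag e.2 != "")).filter
          (fun e => !(!(cs.contains (pvScope e.2))))).map
          (fun (e : Int × List (String × String)) =>
            if !(cs.contains (pvScope e.2)) then (e.1, pvMk e.2)
            else (e.1 + total, pvTrunc e.2))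
        = (((PySem.List.enumerate upd n).filter (fun e => pvTag e.2 != "")).filter
            (fun e => !(!(cs.contains (pvScope e.2))))).map
            (fun e => (e.1 + total, pvTrunc e.2)) := by
    apply List.map_congr_left
    intro e he
    have hc := (List.mem_filter.mp he).2
    have hc' : cs.contains (pvScope e.2) = true := by simpa using hc
    have hm : pvScope e.2 ∈ cs := (PySem.Set.contains_iff cs _).mp hc'
    rw [if_neg (by simp [hm])]
  have hperm :
      ((((PySem.List.enumerate cur 0).filter
            (fun e => pvTag e.2 != "" && !(us.contains (pvScope e.2)))).map
            (fun e => (e.1, pvMk e.2)))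
        ++ ((((PySem.List.enumerate upd n).filter (fun e => pvTag e.2 != "")).filter
              (fun e => !(cs.contains (pvScope e.2)))).map (fun e => (e.1, pvMk e.2))
          ++ (((PySem.List.enumerate upd n).filter (fun e => pvTag e.2 != "")).filter
              (fun e => !(!(cs.contains (pvScope e.2))))).map
              (fun e => (e.1 + total, pvTrunc e.2)))).Perm
      ((((PySem.List.enumerate cur 0).filter
            (fun e => pvTag e.2 != "" && !(us.contains (pvScope e.2)))).map
            (fun e => (e.1, pvMk e.2)))
        ++ ((PySem.List.enumerate upd n).filter (fun e => pvTag e.2 != "")).map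
            (fun (e : Int × List (String × String)) =>
              if !(cs.contains (pvScope e.2)) then (e.1, pvMk e.2)
              else (e.1 + total, pvTrunc e.2))) := by
    apply List.Perm.append_left
    rw [← hmapg, ← hmapg2, ← List.map_append]
    exact (List.filter_append_perm _ _).map _
  have hpw :
      ((((PySem.List.enumerate cur 0).filter
            (fun e => pvTag e.2 != "" && !(us.contains (pvScope e.2)))).map
            (fun e => (e.1, pvMk e.2)))
        ++ ((((PySem.List.enumerate upd n).filter (fun e => pvTag e.2 != "")).filter
              (fun e => !(cs.contains (pvScope e.2)))).map (fun e => (e.1, pvMk e.2))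
          ++ (((PySem.List.enumerate upd n).filter (fun e => pvTag e.2 != "")).filter
              (fun e => !(!(cs.contains (pvScope e.2))))).map
              (fun e => (e.1 + total, pvTrunc e.2)))).Pairwise
        (fun a b => a.1 < b.1) := by
    have h0 : (0:Int) ≤ n := by rw [hn]; omega
    have htot : n ≤ total := by rw [htotal, hn]; omega
    rw [List.pairwise_append]
    refine ⟨?_, ?_, ?_⟩
    · exact pv_pairwise_shift ((PySem.List.pairwise_lt_enumerate cur 0).filter _)
        _ 0 (by intro e; simp)
    · rw [List.pairwise_append]
      refine ⟨?_, ?_, ?_⟩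
      · exact pv_pairwise_shift
          (((PySem.List.pairwise_lt_enumerate upd n).filter _).filter _) _ 0 (by intro e; simp)
      · exact pv_pairwise_shift
          (((PySem.List.pairwise_lt_enumerate upd n).filter _).filter _) _ total
          (by intro e; simp)
      · intro a ha b hb
        obtain ⟨ea, hea, rfl⟩ := List.mem_map.mp ha
        obtain ⟨eb, heb, rfl⟩ := List.mem_map.mp hb
        have hba := pv_enum_fst_bounds (List.mem_filter.mp (List.mem_filter.mp hea).1).1
        have hbb := pv_enum_fst_bounds (List.mem_filter.mp (List.mem_filter.mp heb).1).1
        simp only []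
        rw [htotal, hn] at *
        omega
    · intro a ha b hb
      obtain ⟨ea, hea, rfl⟩ := List.mem_map.mp ha
      have hba := pv_enum_fst_bounds (List.mem_filter.mp hea).1
      rcases List.mem_append.mp hb with hb | hb <;>
        obtain ⟨eb, heb, rfl⟩ := List.mem_map.mp hb <;>
        have hbb := pv_enum_fst_bounds (List.mem_filter.mp (List.mem_filter.mp heb).1).1 <;>
        simp only [] <;> rw [htotal, hn] at * <;> omega
  have hs := PySem.List.sorted_eq_of_perm_of_pairwise_lt _ _ _ hperm hpw
  rw [hs]
  -- drop the decorations
  simp only [List.map_append, List.map_map, List.filter_filter, Bool.not_not]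
  rw [← List.append_assoc]
  congr 1
  congr 1
  · exact pv_enum_filter_map_snd _ _ _ _ _ _ (fun e => rfl) (fun e => rfl)
  · exact pv_enum_filter_map_snd _ _ _ _ _ _ (fun e => rfl) (fun e => rfl)
  · exact pv_enum_filter_map_snd _ _ _ _ _ _ (fun e => rfl) (fun e => rfl)

-- ===== VERDICT (by name: the statement is the Claim_ definition above) =====
theorem update_v3_tags_spec : Claim_equal_update_v3_tags := by
  intro cur upd _ _
  unfold Spec_update_v3_tags
  rw [pv_A_norm, pv_B_norm]
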